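-- pv_equiv track=rewrite | github.com/sun-hainan/Python | 05_动态规划/dp_bitmask_optimization.py | sos_dp_max
-- ===== SOURCE A (Python) =====
-- from typing import List, Callable
-- import math
--
-- def sos_dp_max(g: List[int]) -> List[int]:
--
--     """
--
--     SOS DP - 计算所有子集的最大值
--
--
--
--     f[mask] = max_{sub ⊆ mask} g[sub]
--
--     """
--
--     n = int(math.log2(len(g)))
--
--     f = g.copy()
--
--
--
--     for i in range(n):
--
--         for mask in range(1 << n):
--
--             if mask & (1 << i):
--
--                 f[mask] = max(f[mask], f[mask ^ (1 << i)])
--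
--
--
--     return f
-- ===== SOURCE B (Python) =====
-- import math
-- from typing import List
--
--
-- def sos_dp_max(g: List[int]) -> List[int]:
--     """SOS - f[mask] = max of g over all submasks of mask, computed by
--     enumerating each mask's submasks directly with the (sub - 1) & mask trick."""
--     n = int(math.log2(len(g)))
--     f = g.copy()
--     for mask in range(1 << n):
--         sub = mask
--         while sub:
--             sub = (sub - 1) & mask
--             if g[sub] > f[mask]:
--                 f[mask] = g[sub]
--     return f
-- ===== Notes on version B (the rewrite author's own statement) =====
-- stated objective: alternative
-- what changed: Replaces the layered bitwise SOS DP (one pass over the whole table per bit, reading partially-updated table entries) with a direct per-mask enumeration of all submasks via the (sub - 1) & mask trick, reading only the original g; Pre_ excludes only the empty list, on which A raises ValueError (math.log2(0)).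
import Mathlib
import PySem

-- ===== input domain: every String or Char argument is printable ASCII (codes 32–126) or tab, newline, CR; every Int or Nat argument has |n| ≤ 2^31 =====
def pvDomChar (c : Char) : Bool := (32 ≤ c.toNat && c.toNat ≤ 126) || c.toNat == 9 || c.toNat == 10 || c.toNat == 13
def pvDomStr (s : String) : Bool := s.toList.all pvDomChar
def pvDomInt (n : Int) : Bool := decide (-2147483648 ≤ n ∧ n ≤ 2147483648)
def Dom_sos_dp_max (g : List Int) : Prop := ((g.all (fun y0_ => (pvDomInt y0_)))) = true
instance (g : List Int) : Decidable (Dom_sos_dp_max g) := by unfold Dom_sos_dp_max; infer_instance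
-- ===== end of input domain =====

-- B replaces A's layered bitwise SOS DP (one pass per bit over the table, reading
-- partially-updated entries) with a direct per-mask enumeration of all submasks via
-- (sub - 1) & mask, reading only the original g; same return value, no speed claim.
-- A does not mutate its argument (it works on g.copy()).

-- ===== PORT A =====
-- Port notes: `int(math.log2(len(g)))` is exactly floor(log2 len) = Nat.log2 on the lengths
-- admitted here (Python raises ValueError on the empty list; excluded by Pre_).
-- All reads/writes f[mask], f[mask ^ (1 << i)] have indices < 2^n ≤ len(g), so
-- List.getD/List.set are exact ports of the in-range Python indexing.
def innerA (i : Nat) (f : List Int) (mask : Nat) : List Int :=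
  if mask &&& (1 <<< i) ≠ 0 then
    f.set mask (max (f.getD mask 0) (f.getD (mask ^^^ (1 <<< i)) 0))
  else f

def sos_dp_max (g : List Int) : List Int :=
  let n := Nat.log2 g.length
  (List.range n).foldl (fun f i => (List.range (1 <<< n)).foldl (innerA i) f) g

-- ===== PORT B =====
-- `while sub: sub = (sub - 1) & mask; if g[sub] > f[mask]: f[mask] = g[sub]`.
-- Termination: the new sub is (s &&& mask) ≤ s < s + 1.
def whileB (g : List Int) (mask : Nat) (f : List Int) (sub : Nat) : List Int :=
  match sub with
  | 0 => f
  | s + 1 =>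
    whileB g mask
      (if g.getD (s &&& mask) 0 > f.getD mask 0
        then f.set mask (g.getD (s &&& mask) 0) else f)
      (s &&& mask)
termination_by sub
decreasing_by exact Nat.lt_succ_of_le Nat.and_le_left

def sos_dp_max_alt (g : List Int) : List Int :=
  let n := Nat.log2 g.length
  (List.range (1 <<< n)).foldl (fun f mask => whileB g mask f mask) g

-- ===== PRECONDITION & SPEC =====
-- Pre_ excludes only the empty list, on which Python A raises ValueError (math.log2(0)).
def Pre_sos_dp_max (g : List Int) : Prop := g ≠ []
instance (g : List Int) : Decidable (Pre_sos_dp_max g) := by unfold Pre_sos_dp_max; infer_instance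

def pvWitness_sos_dp_max : List Int := [3, -1, 4, 1]

def Spec_sos_dp_max (g : List Int) (out : List Int) : Prop := out = sos_dp_max_alt g
instance (g : List Int) (out : List Int) : Decidable (Spec_sos_dp_max g out) := by unfold Spec_sos_dp_max; infer_instance

-- ===== CLAIM (what is proved, stated in full; the proofs are below) =====
def Claim_equal_sos_dp_max : Prop := ∀ (g : List Int), Dom_sos_dp_max g → Pre_sos_dp_max g → Spec_sos_dp_max g (sos_dp_max g)

-- ===== LEMMAS AND PROOFS =====

-- the functional description of A's DP rounds
def F (g : List Int) : Nat → Nat → Int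
  | 0, mask => g.getD mask 0
  | i + 1, mask =>
      if mask &&& 2 ^ i ≠ 0 then max (F g i mask) (F g i (mask ^^^ 2 ^ i))
      else F g i mask

-- the value B's while loop computes at index mask, as an accumulator recursion
def loopB (g : List Int) (mask : Nat) (sub : Nat) (best : Int) : Int :=
  match sub with
  | 0 => best
  | s + 1 =>
    loopB g mask (s &&& mask)
      (if g.getD (s &&& mask) 0 > best then g.getD (s &&& mask) 0 else best)
termination_by sub
decreasing_by exact Nat.lt_succ_of_le Nat.and_le_left

-- small arithmetic / list helpers ------------------------------------------------
lemma getD_set_self (l : List Int) (k : Nat) (a : Int) (h : k < l.length) :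
    (l.set k a).getD k 0 = a := by
  simp [List.getD, h]

lemma getD_set_ne (l : List Int) (k j : Nat) (a : Int) (h : j ≠ k) :
    (l.set k a).getD j 0 = l.getD j 0 := by
  simp [List.getD, List.getElem?_set_ne (Ne.symm h)]

-- bit helpers ---------------------------------------------------------------------
lemma and_pow_ne_iff (mask i : Nat) : (mask &&& 2 ^ i ≠ 0) ↔ mask.testBit i = true := by
  rw [Nat.and_two_pow]
  cases h : mask.testBit i <;> simp [Nat.pow_eq_zero]

lemma submask_testBit {s m : Nat} (h : s &&& m = s) (j : Nat) :
    (s.testBit j && m.testBit j) = s.testBit j := by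
  have := congrArg (fun x => Nat.testBit x j) h
  simpa only [Nat.testBit_and] using this

lemma sub_and {s m' m : Nat} (h1 : s &&& m' = s) (h2 : m' &&& m = m') : s &&& m = s := by
  conv_lhs => rw [← h1, Nat.and_assoc, h2]
  exact h1

lemma xor_submask {s m : Nat} (h : s &&& m = s) : (m ^^^ s) &&& m = m ^^^ s := by
  apply Nat.eq_of_testBit_eq
  intro j
  have hj := submask_testBit h j
  simp only [Nat.testBit_and, Nat.testBit_xor]
  cases hm : m.testBit j <;> cases hs : s.testBit j <;> simp_all

lemma lt_pow_of_notBit {x i : Nat} (h1 : x < 2 ^ (i + 1)) (h2 : x.testBit i = false) :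
    x < 2 ^ i := by
  apply Nat.lt_pow_two_of_testBit
  intro j hj
  rcases eq_or_lt_of_le hj with rfl | hlt
  · exact h2
  · exact Nat.testBit_lt_two_pow (lt_of_lt_of_le h1 (Nat.pow_le_pow_right (by norm_num) hlt))

lemma xor_pow_lt_of_lt {x i : Nat} (h : x < 2 ^ i) : x ^^^ 2 ^ i < 2 ^ (i + 1) := by
  apply Nat.lt_pow_two_of_testBit
  intro j hj
  have hij : i < j := hj
  have hx : x.testBit j = false :=
    Nat.testBit_lt_two_pow (lt_of_lt_of_le h (Nat.pow_le_pow_right (by norm_num) hij.le))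
  simp [Nat.testBit_xor, hx, Nat.testBit_two_pow_of_ne hij.ne]

lemma xor_pow_lt_of_bit {x i : Nat} (h1 : x < 2 ^ (i + 1)) (h2 : x.testBit i = true) :
    x ^^^ 2 ^ i < 2 ^ i := by
  apply Nat.lt_pow_two_of_testBit
  intro j hj
  rcases eq_or_lt_of_le hj with rfl | hlt
  · simp [Nat.testBit_xor, h2, Nat.testBit_two_pow_self]
  · have hx : x.testBit j = false :=
      Nat.testBit_lt_two_pow (lt_of_lt_of_le h1 (Nat.pow_le_pow_right (by norm_num) hlt))
    simp [Nat.testBit_xor, hx, Nat.testBit_two_pow_of_ne hlt.ne]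

lemma xor_lt_pow {a b n : Nat} (ha : a < 2 ^ n) (hb : b < 2 ^ n) : a ^^^ b < 2 ^ n :=
  Nat.xor_lt_two_pow ha hb

-- the chain lemma: (t-1) &&& m is ≥ every submask of m strictly below t ------------
lemma and_div_two (a b : Nat) : (a &&& b) / 2 = a / 2 &&& b / 2 := by
  rw [← Nat.shiftRight_one, ← Nat.shiftRight_one a, ← Nat.shiftRight_one b,
    Nat.shiftRight_and_distrib]

lemma two_mul_add_and (a b : Nat) (x y : Bool) :
    (2 * a + x.toNat) &&& (2 * b + y.toNat) = 2 * (a &&& b) + (x && y).toNat := by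
  apply Nat.eq_of_testBit_eq
  intro j
  cases j with
  | zero =>
    rw [Nat.testBit_and]
    simp only [Nat.testBit_zero]
    have h1 : (2 * a + x.toNat) % 2 = x.toNat := by cases x <;> simp
    have h2 : (2 * b + y.toNat) % 2 = y.toNat := by cases y <;> simp
    have h3 : (2 * (a &&& b) + (x && y).toNat) % 2 = (x && y).toNat := by
      cases x <;> cases y <;> simp
    rw [h1, h2, h3]
    cases x <;> cases y <;> simp
  | succ j =>
    simp only [Nat.testBit_succ]
    have h1 : (2 * a + x.toNat) / 2 = a := by cases x <;> simp <;> omega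
    have h2 : (2 * b + y.toNat) / 2 = b := by cases y <;> simp <;> omega
    have h3 : (2 * (a &&& b) + (x && y).toNat) / 2 = a &&& b := by
      cases x <;> cases y <;> simp <;> omega
    rw [and_div_two, h1, h2, h3]

lemma chain_le : ∀ t s m : Nat, t &&& m = t → s &&& m = s → s < t → s ≤ (t - 1) &&& m := by
  intro t
  induction t using Nat.strong_induction_on with
  | _ t IH =>
    intro s m ht hs hst
    have hsm2 : (s / 2) &&& (m / 2) = s / 2 := by rw [← and_div_two, hs]
    have htm2 : (t / 2) &&& (m / 2) = t / 2 := by rw [← and_div_two, ht]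
    have hs0 : s % 2 = 1 → m % 2 = 1 := by
      intro h
      have hb := submask_testBit hs 0
      simp [Nat.testBit_zero, h] at hb
      exact hb
    have hmeq : m = 2 * (m / 2) + (decide (m % 2 = 1)).toNat := by
      rcases Nat.mod_two_eq_zero_or_one m with h | h <;> simp [h] <;> omega
    rcases Nat.mod_two_eq_zero_or_one t with ht2 | ht2
    · have hs2 : s / 2 < t / 2 := by omega
      have key := IH (t / 2) (by omega) (s / 2) (m / 2) htm2 hsm2 hs2
      have hteq : t - 1 = 2 * (t / 2 - 1) + (true : Bool).toNat := by simp; omega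
      have hsb : s % 2 ≤ (decide (m % 2 = 1)).toNat := by
        rcases Nat.mod_two_eq_zero_or_one s with h | h
        · omega
        · simp [hs0 h]; omega
      rw [hteq]
      conv_rhs => rw [hmeq]
      rw [two_mul_add_and]
      simp only [Bool.true_and]
      omega
    · have hteq : t - 1 = 2 * (t / 2) + (false : Bool).toNat := by simp; omega
      rw [hteq]
      conv_rhs => rw [hmeq]
      rw [two_mul_add_and, htm2]
      simp
      omega

-- A-side: the DP invariant ----------------------------------------------------------
lemma pow_and_of_bit {mask i : Nat} (h : mask.testBit i = true) : 2 ^ i &&& mask = 2 ^ i := by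
  apply Nat.eq_of_testBit_eq
  intro j
  by_cases hij : i = j
  · subst hij; simp [Nat.testBit_and, Nat.testBit_two_pow_self, h]
  · simp [Nat.testBit_and, Nat.testBit_two_pow_of_ne hij]

lemma notBit_of_and_eq_zero {mask i : Nat} (h : ¬ mask &&& 2 ^ i ≠ 0) : mask.testBit i = false := by
  cases hm : mask.testBit i
  · rfl
  · exact absurd ((and_pow_ne_iff mask i).mpr hm) h

lemma submask_notBit {s m : Nat} (h : s &&& m = s) {i : Nat} (hm : m.testBit i = false) :
    s.testBit i = false := by
  have hj := submask_testBit h i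
  rw [hm] at hj
  simpa using hj.symm

lemma xor_shuffle (m p s : Nat) : ((m ^^^ p) ^^^ s) ^^^ p = m ^^^ s := by
  apply Nat.eq_of_testBit_eq
  intro j
  simp only [Nat.testBit_xor]
  cases m.testBit j <;> cases p.testBit j <;> cases s.testBit j <;> rfl

lemma F_ub (g : List Int) : ∀ i mask s, s &&& mask = s → mask ^^^ s < 2 ^ i →
    g.getD s 0 ≤ F g i mask := by
  intro i
  induction i with
  | zero =>
    intro mask s h hlt
    have h0 : mask ^^^ s = 0 := by simpa using Nat.lt_one_iff.mp hlt
    have hms : mask = s := by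
      have := congrArg (fun x => x ^^^ s) h0
      simpa [Nat.xor_assoc] using this
    subst hms
    simp [F]
  | succ i IH =>
    intro mask s h hlt
    simp only [F]
    by_cases hb : mask &&& 2 ^ i ≠ 0
    · rw [if_pos hb]
      have hmb : mask.testBit i = true := (and_pow_ne_iff mask i).mp hb
      by_cases hsb : s.testBit i = true
      · have hxb : (mask ^^^ s).testBit i = false := by
          simp [Nat.testBit_xor, hmb, hsb]
        exact le_trans (IH mask s h (lt_pow_of_notBit hlt hxb)) (le_max_left _ _)
      · have hsf : s.testBit i = false := by simpa using hsb
        have hsub' : s &&& (mask ^^^ 2 ^ i) = s := by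
          apply Nat.eq_of_testBit_eq
          intro j
          have hj := submask_testBit h j
          by_cases hij : j = i
          · subst hij; simp [Nat.testBit_and, hsf]
          · simp only [Nat.testBit_and, Nat.testBit_xor,
              Nat.testBit_two_pow_of_ne (fun he => hij he.symm), Bool.xor_false]
            exact hj
        have hxb : (mask ^^^ s).testBit i = true := by
          simp [Nat.testBit_xor, hmb, hsf]
        have heq : (mask ^^^ 2 ^ i) ^^^ s = (mask ^^^ s) ^^^ 2 ^ i := by
          apply Nat.eq_of_testBit_eq
          intro j
          simp only [Nat.testBit_xor]
          cases mask.testBit j <;> cases s.testBit j <;> cases (2 ^ i).testBit j <;> rfl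
        have hx : (mask ^^^ 2 ^ i) ^^^ s < 2 ^ i := by
          rw [heq]; exact xor_pow_lt_of_bit hlt hxb
        exact le_trans (IH (mask ^^^ 2 ^ i) s hsub' hx) (le_max_right _ _)
    · rw [if_neg hb]
      have hmb : mask.testBit i = false := notBit_of_and_eq_zero hb
      have hsf : s.testBit i = false := submask_notBit h hmb
      have hxb : (mask ^^^ s).testBit i = false := by
        simp [Nat.testBit_xor, hmb, hsf]
      exact IH mask s h (lt_pow_of_notBit hlt hxb)

lemma F_att (g : List Int) : ∀ i mask, ∃ s, s &&& mask = s ∧ mask ^^^ s < 2 ^ i ∧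
    g.getD s 0 = F g i mask := by
  intro i
  induction i with
  | zero =>
    intro mask
    exact ⟨mask, Nat.and_self mask, by simp, by simp [F]⟩
  | succ i IH =>
    intro mask
    have hpow : (2 : Nat) ^ i ≤ 2 ^ (i + 1) := Nat.pow_le_pow_right (by norm_num) (by omega)
    by_cases hb : mask &&& 2 ^ i ≠ 0
    · have hmb : mask.testBit i = true := (and_pow_ne_iff mask i).mp hb
      rcases max_choice (F g i mask) (F g i (mask ^^^ 2 ^ i)) with hc | hc
      · obtain ⟨s, hsub, hltx, he⟩ := IH mask
        refine ⟨s, hsub, lt_of_lt_of_le hltx hpow, ?_⟩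
        simp only [F]
        rw [if_pos hb, hc]
        exact he
      · obtain ⟨s, hsub', hltx, he⟩ := IH (mask ^^^ 2 ^ i)
        have hmm : (mask ^^^ 2 ^ i) &&& mask = mask ^^^ 2 ^ i := xor_submask (pow_and_of_bit hmb)
        have hsub : s &&& mask = s := sub_and hsub' hmm
        have hmx : mask ^^^ s = ((mask ^^^ 2 ^ i) ^^^ s) ^^^ 2 ^ i := (xor_shuffle mask (2 ^ i) s).symm
        refine ⟨s, hsub, ?_, ?_⟩
        · rw [hmx]; exact xor_pow_lt_of_lt hltx
        · simp only [F]
          rw [if_pos hb, hc]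
          exact he
    · obtain ⟨s, hsub, hltx, he⟩ := IH mask
      refine ⟨s, hsub, lt_of_lt_of_le hltx hpow, ?_⟩
      simp only [F]
      rw [if_neg hb]
      exact he

-- A-side: the fold computes F ------------------------------------------------------
lemma inner_prefix (i : Nat) (f : List Int) : ∀ k : Nat, k ≤ f.length →
    ((List.range k).foldl (innerA i) f).length = f.length ∧
    ∀ j, ((List.range k).foldl (innerA i) f).getD j 0 =
      if j < k ∧ j &&& 2 ^ i ≠ 0 then max (f.getD j 0) (f.getD (j ^^^ 2 ^ i) 0)
      else f.getD j 0 := by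
  intro k
  induction k with
  | zero => intro _; exact ⟨rfl, fun j => by simp⟩
  | succ k IH =>
    intro hk
    obtain ⟨hlen, hinv⟩ := IH (by omega)
    rw [List.range_succ, List.foldl_append, List.foldl_cons, List.foldl_nil]
    set f' := (List.range k).foldl (innerA i) f with hf'
    unfold innerA
    rw [Nat.one_shiftLeft]
    by_cases hb : k &&& 2 ^ i ≠ 0
    · rw [if_pos hb]
      have hbit : k.testBit i = true := (and_pow_ne_iff k i).mp hb
      have hr1 : f'.getD k 0 = f.getD k 0 := by rw [hinv k]; simp
      have hxbit : (k ^^^ 2 ^ i).testBit i = false := by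
        simp [Nat.testBit_xor, hbit, Nat.testBit_two_pow_self]
      have hr2 : f'.getD (k ^^^ 2 ^ i) 0 = f.getD (k ^^^ 2 ^ i) 0 := by
        rw [hinv]
        exact if_neg (fun h => absurd ((and_pow_ne_iff _ _).mp h.2) (by simp [hxbit]))
      refine ⟨by rw [List.length_set]; exact hlen, fun j => ?_⟩
      by_cases hj : j = k
      · subst hj
        rw [getD_set_self _ _ _ (by rw [hlen]; omega), hr1, hr2, if_pos ⟨by omega, hb⟩]
      · rw [getD_set_ne _ _ _ _ hj, hinv j]
        by_cases hc : j &&& 2 ^ i ≠ 0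
        · by_cases hjk : j < k
          · rw [if_pos ⟨hjk, hc⟩, if_pos ⟨by omega, hc⟩]
          · rw [if_neg (fun h => hjk h.1), if_neg (fun h => absurd h.1 (by omega))]
        · rw [if_neg (fun h => hc h.2), if_neg (fun h => hc h.2)]
    · rw [if_neg hb]
      refine ⟨hlen, fun j => ?_⟩
      rw [hinv j]
      by_cases hj : j = k
      · subst hj
        rw [if_neg (fun h => absurd h.1 (by omega)), if_neg (fun h => hb h.2)]
      · by_cases hc : j &&& 2 ^ i ≠ 0
        · by_cases hjk : j < k
          · rw [if_pos ⟨hjk, hc⟩, if_pos ⟨by omega, hc⟩]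
          · rw [if_neg (fun h => hjk h.1), if_neg (fun h => absurd h.1 (by omega))]
        · rw [if_neg (fun h => hc h.2), if_neg (fun h => hc h.2)]

lemma outer_fold (g : List Int) (n : Nat) (hn : 2 ^ n ≤ g.length) : ∀ i, i ≤ n →
    ((List.range i).foldl (fun f i' => (List.range (1 <<< n)).foldl (innerA i') f) g).length
      = g.length ∧
    ∀ j, ((List.range i).foldl (fun f i' => (List.range (1 <<< n)).foldl (innerA i') f) g).getD j 0
      = if j < 2 ^ n then F g i j else g.getD j 0 := by
  intro i
  induction i with
  | zero =>
    intro _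
    refine ⟨rfl, fun j => ?_⟩
    simp only [List.range_zero, List.foldl_nil]
    split <;> simp [F]
  | succ i IH =>
    intro hi
    obtain ⟨hlen, hinv⟩ := IH (by omega)
    rw [List.range_succ, List.foldl_append, List.foldl_cons, List.foldl_nil]
    set fi := (List.range i).foldl (fun f i' => (List.range (1 <<< n)).foldl (innerA i') f) g
      with hfi
    rw [Nat.one_shiftLeft]
    obtain ⟨hlen2, hinv2⟩ := inner_prefix i fi (2 ^ n) (by rw [hlen]; exact hn)
    refine ⟨by rw [hlen2, hlen], fun j => ?_⟩
    rw [hinv2 j]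
    by_cases hj : j < 2 ^ n
    · by_cases hb : j &&& 2 ^ i ≠ 0
      · rw [if_pos ⟨hj, hb⟩, if_pos hj]
        have hxj : j ^^^ 2 ^ i < 2 ^ n :=
          xor_lt_pow hj (Nat.pow_lt_pow_right (by norm_num) (by omega))
        rw [hinv j, hinv (j ^^^ 2 ^ i), if_pos hj, if_pos hxj]
        simp only [F]
        rw [if_pos hb]
      · rw [if_neg (fun h => hb h.2), if_pos hj, hinv j, if_pos hj]
        simp only [F]
        rw [if_neg hb]
    · rw [if_neg (fun h => hj h.1), if_neg hj, hinv j, if_neg hj]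

-- B-side: the while loop is a set of the accumulator value ---------------------------
lemma loopB_zero (g : List Int) (mask : Nat) (best : Int) : loopB g mask 0 best = best := by
  simp [loopB]

lemma loopB_succ (g : List Int) (mask s : Nat) (best : Int) :
    loopB g mask (s + 1) best =
      loopB g mask (s &&& mask)
        (if g.getD (s &&& mask) 0 > best then g.getD (s &&& mask) 0 else best) := by
  rw [loopB]

lemma whileB_spec (g : List Int) (mask : Nat) : ∀ sub f, mask < f.length →
    (whileB g mask f sub).length = f.length ∧
    (∀ j, j ≠ mask → (whileB g mask f sub).getD j 0 = f.getD j 0) ∧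
    (whileB g mask f sub).getD mask 0 = loopB g mask sub (f.getD mask 0) := by
  intro sub
  induction sub using Nat.strong_induction_on with
  | _ sub IH =>
    match sub with
    | 0 =>
      intro f _
      rw [show whileB g mask f 0 = f from by rw [whileB]]
      exact ⟨rfl, fun _ _ => rfl, (loopB_zero g mask _).symm⟩
    | s + 1 =>
      intro f hm
      have hlt : s &&& mask < s + 1 := Nat.lt_succ_of_le Nat.and_le_left
      rw [whileB, loopB_succ]
      by_cases hc : g.getD (s &&& mask) 0 > f.getD mask 0
      · rw [if_pos hc, if_pos hc]
        obtain ⟨h1, h2, h3⟩ := IH (s &&& mask) hlt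
          (f.set mask (g.getD (s &&& mask) 0)) (by rw [List.length_set]; exact hm)
        refine ⟨by rw [h1, List.length_set], fun j hj => ?_, ?_⟩
        · rw [h2 j hj, getD_set_ne _ _ _ _ hj]
        · rw [h3, getD_set_self _ _ _ hm]
      · rw [if_neg hc, if_neg hc]
        exact IH (s &&& mask) hlt f hm

-- B-side: loopB is the max over all submasks -----------------------------------------
lemma loopB_ge (g : List Int) (mask : Nat) : ∀ sub best, best ≤ loopB g mask sub best := by
  intro sub
  induction sub using Nat.strong_induction_on with
  | _ sub IH =>
    match sub with
    | 0 => intro best; rw [loopB_zero]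
    | s + 1 =>
      intro best
      rw [loopB_succ]
      refine le_trans ?_ (IH (s &&& mask) (Nat.lt_succ_of_le Nat.and_le_left) _)
      split <;> omega

lemma loopB_att (g : List Int) (mask : Nat) : ∀ sub best,
    loopB g mask sub best = best ∨
    ∃ t, t &&& mask = t ∧ loopB g mask sub best = g.getD t 0 := by
  intro sub
  induction sub using Nat.strong_induction_on with
  | _ sub IH =>
    match sub with
    | 0 => intro best; left; rw [loopB_zero]
    | s + 1 =>
      intro best
      have hlt : s &&& mask < s + 1 := Nat.lt_succ_of_le Nat.and_le_left
      have hsm : (s &&& mask) &&& mask = s &&& mask := by rw [Nat.and_assoc, Nat.and_self]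
      rw [loopB_succ]
      by_cases hc : g.getD (s &&& mask) 0 > best
      · rw [if_pos hc]
        rcases IH (s &&& mask) hlt (g.getD (s &&& mask) 0) with h | ⟨t, ht, he⟩
        · right; exact ⟨s &&& mask, hsm, h⟩
        · right; exact ⟨t, ht, he⟩
      · rw [if_neg hc]
        exact IH (s &&& mask) hlt best

lemma loopB_ub (g : List Int) (mask : Nat) : ∀ sub best t, sub &&& mask = sub →
    t &&& mask = t → t < sub → g.getD t 0 ≤ loopB g mask sub best := by
  intro sub
  induction sub using Nat.strong_induction_on with
  | _ sub IH =>
    match sub with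
    | 0 => intro best t _ _ hlt; omega
    | s + 1 =>
      intro best t hsub ht hlt'
      have hlt : s &&& mask < s + 1 := Nat.lt_succ_of_le Nat.and_le_left
      have hsm : (s &&& mask) &&& mask = s &&& mask := by rw [Nat.and_assoc, Nat.and_self]
      rw [loopB_succ]
      by_cases he : t = s &&& mask
      · subst he
        refine le_trans ?_ (loopB_ge g mask _ _)
        split <;> omega
      · have hts : t ≤ s &&& mask := by
          have := chain_le (s + 1) t mask hsub ht hlt'
          simpa using this
        exact IH (s &&& mask) hlt _ t hsm ht (lt_of_le_of_ne hts he)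

-- the two per-mask values agree ------------------------------------------------------
lemma perMask_eq (g : List Int) (n mask : Nat) (hm : mask < 2 ^ n) :
    F g n mask = loopB g mask mask (g.getD mask 0) := by
  apply le_antisymm
  · obtain ⟨s, hsub, _, he⟩ := F_att g n mask
    rw [← he]
    by_cases hs : s = mask
    · subst hs; exact loopB_ge g s s _
    · have hslt : s < mask := by
        have hle : s ≤ mask := by
          calc s = s &&& mask := hsub.symm
            _ ≤ mask := Nat.and_le_right
        exact lt_of_le_of_ne hle hs
      exact loopB_ub g mask mask _ s (Nat.and_self mask) hsub hslt
  · rcases loopB_att g mask mask (g.getD mask 0) with h | ⟨t, ht, he⟩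
    · rw [h]
      exact F_ub g n mask mask (Nat.and_self mask) (by simpa [Nat.xor_self] using Nat.two_pow_pos n)
    · rw [he]
      have hle : mask ^^^ t ≤ mask := by
        conv_lhs => rw [← xor_submask ht]
        exact Nat.and_le_right
      exact F_ub g n mask t ht (lt_of_le_of_lt hle hm)

-- B-side: the fold over all masks ----------------------------------------------------
lemma foldB (g : List Int) (n : Nat) (hn : 2 ^ n ≤ g.length) : ∀ k, k ≤ 2 ^ n →
    ((List.range k).foldl (fun f mask => whileB g mask f mask) g).length = g.length ∧
    ∀ j, ((List.range k).foldl (fun f mask => whileB g mask f mask) g).getD j 0 =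
      if j < k then loopB g j j (g.getD j 0) else g.getD j 0 := by
  intro k
  induction k with
  | zero => intro _; exact ⟨rfl, fun j => by simp⟩
  | succ k IH =>
    intro hk
    obtain ⟨hlen, hinv⟩ := IH (by omega)
    rw [List.range_succ, List.foldl_append, List.foldl_cons, List.foldl_nil]
    set f' := (List.range k).foldl (fun f mask => whileB g mask f mask) g with hf'
    have hm : k < f'.length := by rw [hlen]; omega
    obtain ⟨h1, h2, h3⟩ := whileB_spec g k k f' hm
    refine ⟨by rw [h1, hlen], fun j => ?_⟩
    by_cases hj : j = k
    · subst hj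
      rw [h3, hinv j]
      rw [if_neg (by omega), if_pos (by omega)]
    · rw [h2 j hj, hinv j]
      by_cases hjk : j < k
      · rw [if_pos hjk, if_pos (by omega)]
      · rw [if_neg hjk, if_neg (by omega)]

-- ===== VERDICT (by name: the statement is the Claim_ definition above) =====
theorem sos_dp_max_spec : Claim_equal_sos_dp_max := by
  unfold Claim_equal_sos_dp_max
  intro g _ hpre
  unfold Spec_sos_dp_max
  unfold Pre_sos_dp_max at hpre
  have hlen0 : g.length ≠ 0 := fun h => hpre (List.length_eq_zero_iff.mp h)
  have hpow : 2 ^ Nat.log2 g.length ≤ g.length := Nat.log2_self_le hlen0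
  obtain ⟨hAlen, hAinv⟩ :=
    outer_fold g (Nat.log2 g.length) hpow (Nat.log2 g.length) le_rfl
  obtain ⟨hBlen, hBinv⟩ := foldB g (Nat.log2 g.length) hpow (2 ^ Nat.log2 g.length) le_rfl
  have hA : sos_dp_max g =
      (List.range (Nat.log2 g.length)).foldl
        (fun f i' => (List.range (1 <<< Nat.log2 g.length)).foldl (innerA i') f) g := rfl
  have hB : sos_dp_max_alt g =
      (List.range (2 ^ Nat.log2 g.length)).foldl (fun f mask => whileB g mask f mask) g := by
    simp only [sos_dp_max_alt, Nat.one_shiftLeft]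
  rw [hA, hB] at *
  apply List.ext_getElem
  · rw [hAlen, hBlen]
  · intro j hj1 hj2
    rw [← List.getD_eq_getElem _ 0 hj1, ← List.getD_eq_getElem _ 0 hj2, hAinv j, hBinv j]
    by_cases hj : j < 2 ^ Nat.log2 g.length
    · rw [if_pos hj, if_pos hj]
      exact perMask_eq g (Nat.log2 g.length) j hj
    · rw [if_neg hj, if_neg hj]
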